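-- pv_equiv track=rewrite | github.com/arthuroliveira44/lambdabot | notebooks/generate_catalog_contexts.py | infer_grao
-- ===== SOURCE A (Python) =====
-- from typing import Any, Dict, List, Optional
--
-- def infer_grao(fqn: str, columns: List[Dict[str, Any]]) -> str:
--     names = [str(c.get("column_name", "")).lower() for c in columns]
--     has_customer = any(n in names for n in ("id_customer", "customer_id"))
--     has_currency = "currency" in names
--     # escolhe uma coluna de tempo mais “canônica”
--     time_candidates = [n for n in names if n.endswith("_date") or n in ("date", "dt", "day", "week", "month")]
--     time_col = time_candidates[0] if time_candidates else None
--
--     parts = []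
--     if has_customer:
--         parts.append("cliente")
--     if has_currency:
--         parts.append("moeda")
--     if time_col:
--         parts.append(f"tempo ({time_col})")
--
--     if parts:
--         return "Provável grão por " + ", ".join(parts) + ". Confirme antes de agregar."
--     return "Grão não inferido a partir do schema. Confirme as chaves/dimensões antes de agregar."
-- ===== SOURCE B (Python) =====
-- from typing import Any, Dict, List, Optional, Tuple
--
-- def _category(n: str) -> Optional[Tuple[str, str]]:
--     # classify one (lowercased) column name into a grain category and its text fragment;
--     # the three categories are mutually exclusive on a single name
--     if n in ("id_customer", "customer_id"):
--         return ("cliente", "cliente")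
--     if n == "currency":
--         return ("moeda", "moeda")
--     if n.endswith("_date") or n in ("date", "dt", "day", "week", "month"):
--         return ("tempo", "tempo (" + n + ")")
--     return None
--
-- def infer_grao(fqn: str, columns: List[Dict[str, Any]]) -> str:
--     # index columns by category once (first occurrence wins), then read the
--     # categories back in their fixed presentation order
--     found: Dict[str, str] = {}
--     for c in columns:
--         cat = _category(str(c.get("column_name", "")).lower())
--         if cat is not None and cat[0] not in found:
--             found[cat[0]] = cat[1]
--     parts = [found[k] for k in ("cliente", "moeda", "tempo") if k in found]
--     if parts:
--         return "Provável grão por " + ", ".join(parts) + ". Confirme antes de agregar."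
--     return "Grão não inferido a partir do schema. Confirme as chaves/dimensões antes de agregar."
-- ===== Notes on version B (the rewrite author's own statement) =====
-- stated objective: alternative
-- what changed: Replaces A's names list scanned four times (two membership tests, a filter, an index) by a classifier that maps each column name to a category, a first-wins dict index from category to text fragment built in one pass, and a readback of the dict in fixed category order.
import Mathlib
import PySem

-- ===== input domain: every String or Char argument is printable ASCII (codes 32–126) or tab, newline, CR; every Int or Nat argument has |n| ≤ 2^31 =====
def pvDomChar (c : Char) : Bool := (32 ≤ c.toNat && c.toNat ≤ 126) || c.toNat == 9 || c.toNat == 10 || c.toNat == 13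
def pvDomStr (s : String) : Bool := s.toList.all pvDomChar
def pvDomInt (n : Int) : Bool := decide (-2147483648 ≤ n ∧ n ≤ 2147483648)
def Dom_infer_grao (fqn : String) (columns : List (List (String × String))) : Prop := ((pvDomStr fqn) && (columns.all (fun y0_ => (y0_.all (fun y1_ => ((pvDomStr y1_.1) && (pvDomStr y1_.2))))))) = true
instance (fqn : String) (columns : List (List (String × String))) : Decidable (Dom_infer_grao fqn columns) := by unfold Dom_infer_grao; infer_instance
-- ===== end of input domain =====

-- B classifies each column name into a category once and indexes the categories in a
-- first-wins dict read back in fixed order, instead of A's names list scanned four times.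

-- ===== PORT A =====
-- str(c.get("column_name", "")).lower()  (dict values are strings under the type convention)
def pvColName (c : List (String × String)) : String :=
  PySem.Str.lower (PySem.Dict.getD (PySem.Dict.mk c) "column_name" "")

-- n.endswith("_date") or n in ("date", "dt", "day", "week", "month")
def pvIsTime (n : String) : Bool :=
  PySem.Str.endswith n "_date" || n == "date" || n == "dt" || n == "day" || n == "week" || n == "month"

def infer_grao (fqn : String) (columns : List (List (String × String))) : String :=
  let names := columns.map pvColName
  -- any(n in names for n in ("id_customer", "customer_id"))
  let has_customer := names.contains "id_customer" || names.contains "customer_id"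
  let has_currency := names.contains "currency"
  let time_candidates := names.filter pvIsTime
  let time_col : Option String := time_candidates.head?
  let parts : List String :=
    (if has_customer then ["cliente"] else []) ++
    (if has_currency then ["moeda"] else []) ++
    -- `if time_col:` — Python truthiness: some nonempty string
    (match time_col with
     | some t => if t == "" then [] else ["tempo (" ++ t ++ ")"]
     | none => [])
  if parts.isEmpty then
    "Grão não inferido a partir do schema. Confirme as chaves/dimensões antes de agregar."
  else
    "Provável grão por " ++ PySem.Str.join ", " parts ++ ". Confirme antes de agregar."

-- ===== PORT B =====
-- _category(n) of Source B
def pvCat (n : String) : Option (String × String) :=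
  if n == "id_customer" || n == "customer_id" then some ("cliente", "cliente")
  else if n == "currency" then some ("moeda", "moeda")
  else if PySem.Str.endswith n "_date" || n == "date" || n == "dt" || n == "day" || n == "week" || n == "month" then
    some ("tempo", "tempo (" ++ n ++ ")")
  else none

-- loop body of Source B: first-wins insertion of the category's fragment
def pvStepB (d : PySem.Dict String String) (c : List (String × String)) : PySem.Dict String String :=
  match pvCat (pvColName c) with
  | some kv => if d.contains kv.1 then d else d.insert kv.1 kv.2
  | none => d

def infer_grao_alt (fqn : String) (columns : List (List (String × String))) : String :=
  let found := columns.foldl pvStepB PySem.Dict.empty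
  -- [found[k] for k in ("cliente", "moeda", "tempo") if k in found]
  let parts : List String := ["cliente", "moeda", "tempo"].filterMap (fun k => found.get? k)
  if parts.isEmpty then
    "Grão não inferido a partir do schema. Confirme as chaves/dimensões antes de agregar."
  else
    "Provável grão por " ++ PySem.Str.join ", " parts ++ ". Confirme antes de agregar."

-- ===== PRECONDITION & SPEC =====
def Spec_infer_grao (fqn : String) (columns : List (List (String × String))) (out : String) : Prop := out = infer_grao_alt fqn columns
instance (fqn : String) (columns : List (List (String × String))) (out : String) : Decidable (Spec_infer_grao fqn columns out) := by unfold Spec_infer_grao; infer_instance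

-- ===== CLAIM =====
def Claim_equal_infer_grao : Prop := ∀ (fqn : String) (columns : List (List (String × String))), Dom_infer_grao fqn columns → Spec_infer_grao fqn columns (infer_grao fqn columns)

-- ===== LEMMAS AND PROOFS =====

theorem pvTime_not_special {n : String} (h : pvIsTime n = true) :
    n ≠ "id_customer" ∧ n ≠ "customer_id" ∧ n ≠ "currency" := by
  refine ⟨?_, ?_, ?_⟩ <;> rintro rfl <;> exact absurd h (by decide)

-- a step whose category key differs from k leaves get? k unchanged
theorem pvStepB_get?_other (d : PySem.Dict String String) (c : List (String × String))
    (k : String) (hk : ∀ kv, pvCat (pvColName c) = some kv → kv.1 ≠ k) :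
    (pvStepB d c).get? k = d.get? k := by
  unfold pvStepB
  cases hcat : pvCat (pvColName c) with
  | none => rfl
  | some kv =>
    change (if d.contains kv.1 = true then d else d.insert kv.1 kv.2).get? k = d.get? k
    by_cases hc : d.contains kv.1 = true
    · simp [hc]
    · rw [if_neg hc]
      exact PySem.Dict.get?_insert_of_ne d kv.2 (fun h => hk kv hcat h.symm)

-- a step whose category is (k, v) sets get? k first-wins
theorem pvStepB_get?_hit (d : PySem.Dict String String) (c : List (String × String))
    (k v : String) (hcat : pvCat (pvColName c) = some (k, v)) :
    (pvStepB d c).get? k = (d.get? k).or (some v) := by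
  unfold pvStepB
  rw [hcat]
  by_cases hc : d.contains k = true
  · have : (d.get? k).isSome = true := by
      rw [← PySem.Dict.contains_eq_isSome_get?]; exact hc
    rcases Option.isSome_iff_exists.mp this with ⟨w, hw⟩
    simp [hc, hw]
  · have hnone : d.get? k = none := by
      rw [PySem.Dict.get?_eq_none_iff_contains]; simpa using hc
    simp [hc, hnone, PySem.Dict.get?_insert_self]

theorem pvFoldB_cliente (cs : List (List (String × String))) (d : PySem.Dict String String) :
    (cs.foldl pvStepB d).get? "cliente" =
      (d.get? "cliente").or
        (if (cs.map pvColName).contains "id_customer" || (cs.map pvColName).contains "customer_id"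
         then some "cliente" else none) := by
  induction cs generalizing d with
  | nil => simp
  | cons c cs ih =>
    simp only [List.foldl_cons, List.map_cons, List.contains_cons]
    by_cases h1 : (pvColName c == "id_customer" || pvColName c == "customer_id") = true
    · have hn : pvColName c = "id_customer" ∨ pvColName c = "customer_id" := by
        rcases Bool.or_eq_true_iff.mp h1 with h | h
        · exact Or.inl (by simpa using h)
        · exact Or.inr (by simpa using h)
      have hcat : pvCat (pvColName c) = some ("cliente", "cliente") := by
        rcases hn with h | h <;> rw [h] <;> decide
      rw [ih, pvStepB_get?_hit d c _ _ hcat]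
      rcases hn with h | h <;> rw [h] <;>
        cases hd : d.get? "cliente" <;> simp
    · have hk : ∀ kv, pvCat (pvColName c) = some kv → kv.1 ≠ "cliente" := by
        intro kv hcat hk1
        rcases kv with ⟨k1, k2⟩
        unfold pvCat at hcat
        rw [if_neg h1] at hcat
        split_ifs at hcat <;> simp_all
      have hA : ("id_customer" == pvColName c) = false := by
        rw [beq_eq_false_iff_ne]; intro he; exact h1 (by simp [← he])
      have hB : ("customer_id" == pvColName c) = false := by
        rw [beq_eq_false_iff_ne]; intro he; exact h1 (by simp [← he])
      rw [ih, pvStepB_get?_other d c _ hk, hA, hB]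
      simp

theorem pvFoldB_moeda (cs : List (List (String × String))) (d : PySem.Dict String String) :
    (cs.foldl pvStepB d).get? "moeda" =
      (d.get? "moeda").or
        (if (cs.map pvColName).contains "currency" then some "moeda" else none) := by
  induction cs generalizing d with
  | nil => simp
  | cons c cs ih =>
    simp only [List.foldl_cons, List.map_cons, List.contains_cons]
    by_cases h2 : (pvColName c == "currency") = true
    · have hn : pvColName c = "currency" := by simpa using h2
      have hcat : pvCat (pvColName c) = some ("moeda", "moeda") := by rw [hn]; decide
      rw [ih, pvStepB_get?_hit d c _ _ hcat, hn]
      cases hd : d.get? "moeda" <;> simp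
    · have hk : ∀ kv, pvCat (pvColName c) = some kv → kv.1 ≠ "moeda" := by
        intro kv hcat hk1
        rcases kv with ⟨k1, k2⟩
        unfold pvCat at hcat
        split_ifs at hcat <;> simp_all
      have hA : ("currency" == pvColName c) = false := by
        rw [beq_eq_false_iff_ne]; intro he; exact h2 (by simp [← he])
      rw [ih, pvStepB_get?_other d c _ hk, hA]
      simp

theorem pvFoldB_tempo (cs : List (List (String × String))) (d : PySem.Dict String String) :
    (cs.foldl pvStepB d).get? "tempo" =
      (d.get? "tempo").or
        ((((cs.map pvColName).filter pvIsTime).head?).map (fun t => "tempo (" ++ t ++ ")")) := by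
  induction cs generalizing d with
  | nil => simp
  | cons c cs ih =>
    simp only [List.foldl_cons, List.map_cons, List.filter_cons]
    by_cases h3 : pvIsTime (pvColName c) = true
    · obtain ⟨hn1, hn2, hn3⟩ := pvTime_not_special h3
      have hcat : pvCat (pvColName c) = some ("tempo", "tempo (" ++ pvColName c ++ ")") := by
        unfold pvCat
        rw [if_neg (by simp [hn1, hn2]), if_neg (by simp [hn3]),
            if_pos (by unfold pvIsTime at h3; exact h3)]
      rw [ih, pvStepB_get?_hit d c _ _ hcat]
      cases hd : d.get? "tempo" <;> simp [h3]
    · have hk : ∀ kv, pvCat (pvColName c) = some kv → kv.1 ≠ "tempo" := by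
        intro kv hcat hk1
        rcases kv with ⟨k1, k2⟩
        unfold pvCat at hcat
        unfold pvIsTime at h3
        split_ifs at hcat <;> simp_all
      rw [ih, pvStepB_get?_other d c _ hk]
      simp [h3]

theorem pvTime_ne_empty {names : List String} {t : String}
    (h : (names.filter pvIsTime).head? = some t) : (t == "") = false := by
  have hmem : t ∈ names.filter pvIsTime := List.mem_of_mem_head? (by simp [h])
  have hp : pvIsTime t = true := (List.mem_filter.mp hmem).2
  have : t ≠ "" := by
    intro he; subst he
    exact absurd hp (by decide)
  simpa using this

-- ===== VERDICT =====
theorem infer_grao_spec : Claim_equal_infer_grao := by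
  unfold Claim_equal_infer_grao Spec_infer_grao
  intro fqn columns _
  unfold infer_grao infer_grao_alt
  simp only [List.filterMap_cons, List.filterMap_nil]
  rw [pvFoldB_cliente, pvFoldB_moeda, pvFoldB_tempo]
  simp only [PySem.Dict.get?_empty, Option.none_or]
  cases ht : ((columns.map pvColName).filter pvIsTime).head? with
  | none =>
    cases hc : (columns.map pvColName).contains "id_customer" <;>
    cases hc2 : (columns.map pvColName).contains "customer_id" <;>
    cases hcur : (columns.map pvColName).contains "currency" <;>
    simp_all
  | some t =>
    have hne := pvTime_ne_empty ht
    cases hc : (columns.map pvColName).contains "id_customer" <;>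
    cases hc2 : (columns.map pvColName).contains "customer_id" <;>
    cases hcur : (columns.map pvColName).contains "currency" <;>
    simp_all
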